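-- pv_equiv track=rewrite | github.com/AnonymitySubmit/DataPool | DataPoolBasicCodeVision2nd/datapool_analysis_overlap.py | botside_expand
-- ===== SOURCE A (Python) =====
-- def botside_expand(target, list1, height, width): # 该函数属于toplef_expand的下属函数
--     side_bool = [] # 初始化布尔矩阵
--
--     # 每个目标都对比一遍其他目标测试两者是否相对,并保存布尔列表
--     for i in range(len(list1)): # 遍历其他目标, 判断相对位置
--         if target[2] > list1[i][0] and target[0] < list1[i][2] and target[3] < list1[i][1]: # x2 > x'1 & x1 < x'2 & y2 < y'1
--             side_bool.append(True) # True: 存在目标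
--         else:
--             side_bool.append(False) # False: 不存在目标
--
--     # 将目标与其他目标的布尔列表进行或操作,得到该目标对面是否存在目标
--     bot = False
--     for i in range(len(side_bool)):
--         bot = bot or side_bool[i]
--
--     side_bool = [] # 废物利用该列表
--
--     # 取得目标的下距
--     if bot == True:
--         for i in range(len(list1)):
--             if target[3] < list1[i][1] and target[2] > list1[i][0] and target[0] < list1[i][2]: # y2 < y'1 & x2 > x'1 & x1 < x'2
--                 side_bool.append(list1[i][1] - target[3]) # y'1 - y2
--         return min(side_bool)
--     else:
--         return height - target[3]
-- ===== SOURCE B (Python) =====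
-- def botside_expand(target, list1, height, width):
--     # Single pass keeping a running minimum; no boolean matrix, no second scan.
--     best = None
--     for t in list1:
--         if target[2] > t[0] and target[0] < t[2] and target[3] < t[1]:
--             d = t[1] - target[3]
--             if best is None or d < best:
--                 best = d
--     return best if best is not None else height - target[3]
-- ===== Notes on version B (the rewrite author's own statement) =====
-- stated objective: simpler
-- what changed: Replaces A's three sequential passes (build a boolean list, OR-fold it, then re-scan to collect distances and take min) with one pass that keeps a running minimum in a single Option accumulator, falling back to height - target[3] when no target overlapped.
import Mathlib
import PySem

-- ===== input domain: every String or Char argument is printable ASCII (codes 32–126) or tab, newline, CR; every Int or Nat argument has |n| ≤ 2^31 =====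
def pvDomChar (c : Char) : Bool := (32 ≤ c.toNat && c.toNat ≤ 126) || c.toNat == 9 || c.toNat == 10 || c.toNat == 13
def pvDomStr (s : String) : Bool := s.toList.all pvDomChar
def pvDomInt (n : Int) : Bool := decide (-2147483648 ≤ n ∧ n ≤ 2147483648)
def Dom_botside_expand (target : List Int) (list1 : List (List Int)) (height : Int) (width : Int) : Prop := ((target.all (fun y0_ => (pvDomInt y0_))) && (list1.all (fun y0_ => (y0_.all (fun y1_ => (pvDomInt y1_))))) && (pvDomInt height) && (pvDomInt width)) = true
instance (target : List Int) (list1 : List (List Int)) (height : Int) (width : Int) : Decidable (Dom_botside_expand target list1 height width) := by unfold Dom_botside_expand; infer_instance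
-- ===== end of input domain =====

-- B replaces A's three passes (boolean list, OR-fold, re-scan + min) by one running-minimum pass; equivalence is about the return value only.

-- shared index helper: xs[i] for the in-range indices Pre_ guarantees (0 as guard default, never reached inside Pre_)
def pvGetI (xs : List Int) (i : Int) : Int := (PySem.List.pyGet? xs i).getD 0

-- ===== PORT A =====
def botside_expand (target : List Int) (list1 : List (List Int)) (height : Int) (width : Int) : Int :=
  let side_bool : List Bool := list1.foldl (fun acc row =>
      if pvGetI target 2 > pvGetI row 0 ∧ pvGetI target 0 < pvGetI row 2 ∧ pvGetI target 3 < pvGetI row 1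
      then acc ++ [true] else acc ++ [false]) []
  let bot : Bool := side_bool.foldl (fun b x => b || x) false
  if bot = true then
    let diffs : List Int := list1.foldl (fun acc row =>
        if pvGetI target 3 < pvGetI row 1 ∧ pvGetI target 2 > pvGetI row 0 ∧ pvGetI target 0 < pvGetI row 2
        then acc ++ [pvGetI row 1 - pvGetI target 3] else acc) []
    (PySem.List.min? diffs (fun x => x)).getD 0
  else height - pvGetI target 3

-- ===== PORT B =====
def botside_expand_alt (target : List Int) (list1 : List (List Int)) (height : Int) (width : Int) : Int :=
  let best : Option Int := list1.foldl (fun best row =>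
      if pvGetI target 2 > pvGetI row 0 ∧ pvGetI target 0 < pvGetI row 2 ∧ pvGetI target 3 < pvGetI row 1
      then
        let d := pvGetI row 1 - pvGetI target 3
        match best with
        | none => some d
        | some b => if d < b then some d else some b
      else best) none
  match best with
  | some b => b
  | none => height - pvGetI target 3

-- ===== PRECONDITION & SPEC =====
abbrev pvOverlap (target row : List Int) : Prop :=
  pvGetI target 2 > pvGetI row 0 ∧ pvGetI target 0 < pvGetI row 2 ∧ pvGetI target 3 < pvGetI row 1

-- Pre_ is exactly where Python A returns without IndexError: target needs 4 entries; each row needs the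
-- entries the short-circuiting overlap test actually reads, and (only when some row overlaps, so the
-- second scan runs) the entries that scan reads.
def Pre_botside_expand (target : List Int) (list1 : List (List Int)) (height : Int) (width : Int) : Prop :=
  4 ≤ target.length ∧
  (∀ row ∈ list1, 1 ≤ row.length ∧ (pvGetI target 2 > pvGetI row 0 → 3 ≤ row.length)) ∧
  ((∃ row ∈ list1, pvOverlap target row) →
    ∀ row ∈ list1, 2 ≤ row.length ∧ (pvGetI target 3 < pvGetI row 1 → 3 ≤ row.length))

instance (target : List Int) (list1 : List (List Int)) (height : Int) (width : Int) : Decidable (Pre_botside_expand target list1 height width) := by unfold Pre_botside_expand; infer_instance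

def pvWitness_botside_expand : List Int × List (List Int) × Int × Int := ([0, 0, 2, 2], [[0, 5, 2, 9]], 10, 10)

def Spec_botside_expand (target : List Int) (list1 : List (List Int)) (height : Int) (width : Int) (out : Int) : Prop := out = botside_expand_alt target list1 height width
instance (target : List Int) (list1 : List (List Int)) (height : Int) (width : Int) (out : Int) : Decidable (Spec_botside_expand target list1 height width out) := by unfold Spec_botside_expand; infer_instance

-- ===== CLAIM (what is proved, stated in full; the proofs are below) =====
def Claim_equal_botside_expand : Prop := ∀ (target : List Int) (list1 : List (List Int)) (height : Int) (width : Int), Dom_botside_expand target list1 height width → Pre_botside_expand target list1 height width → Spec_botside_expand target list1 height width (botside_expand target list1 height width)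

-- ===== LEMMAS AND PROOFS =====

-- merge of B's running minimum, extracted for the proofs
def pvMerge (o : Option Int) (v : Int) : Option Int :=
  match o with
  | none => some v
  | some b => if v < b then some v else some b

-- the distance A's second scan collects / B minimises
def pvDist (target row : List Int) : Int := pvGetI row 1 - pvGetI target 3

lemma side_bool_eq (target : List Int) (l : List (List Int)) (acc : List Bool) :
    l.foldl (fun acc row =>
      if pvGetI target 2 > pvGetI row 0 ∧ pvGetI target 0 < pvGetI row 2 ∧ pvGetI target 3 < pvGetI row 1
      then acc ++ [true] else acc ++ [false]) acc
    = acc ++ l.map (fun row => decide (pvOverlap target row)) := by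
  induction l generalizing acc with
  | nil => simp
  | cons r t ih =>
    simp only [List.foldl_cons, List.map_cons]
    split_ifs with h
    · rw [ih]
      have hd : decide (pvOverlap target r) = true := by
        simp only [pvOverlap, decide_eq_true_eq]; exact h
      rw [hd]; simp
    · rw [ih]
      have hd : decide (pvOverlap target r) = false := by
        simp only [pvOverlap, decide_eq_false_iff_not]; exact h
      rw [hd]; simp

lemma or_fold_eq (bs : List Bool) (b : Bool) :
    bs.foldl (fun x y => x || y) b = (b || bs.any id) := by
  induction bs generalizing b with
  | nil => simp
  | cons x t ih => rw [List.foldl_cons, ih, List.any_cons, id_eq, Bool.or_assoc]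

lemma diffs_eq (target : List Int) (l : List (List Int)) (acc : List Int) :
    l.foldl (fun acc row =>
      if pvGetI target 3 < pvGetI row 1 ∧ pvGetI target 2 > pvGetI row 0 ∧ pvGetI target 0 < pvGetI row 2
      then acc ++ [pvGetI row 1 - pvGetI target 3] else acc) acc
    = acc ++ l.filterMap (fun row => if pvOverlap target row then some (pvDist target row) else none) := by
  induction l generalizing acc with
  | nil => simp
  | cons r t ih =>
    simp only [List.foldl_cons, List.filterMap_cons]
    have hiff : (pvGetI target 3 < pvGetI r 1 ∧ pvGetI target 2 > pvGetI r 0 ∧ pvGetI target 0 < pvGetI r 2)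
        ↔ pvOverlap target r := by unfold pvOverlap; tauto
    by_cases h : pvOverlap target r
    · rw [if_pos (hiff.mpr h), if_pos h, ih, pvDist]; simp
    · rw [if_neg (fun hc => h (hiff.mp hc)), if_neg h, ih]

lemma best_eq (target : List Int) (l : List (List Int)) (b : Option Int) :
    l.foldl (fun best row =>
      if pvGetI target 2 > pvGetI row 0 ∧ pvGetI target 0 < pvGetI row 2 ∧ pvGetI target 3 < pvGetI row 1
      then
        let d := pvGetI row 1 - pvGetI target 3
        match best with
        | none => some d
        | some x => if d < x then some d else some x
      else best) b
    = (l.filterMap (fun row => if pvOverlap target row then some (pvDist target row) else none)).foldl pvMerge b := by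
  induction l generalizing b with
  | nil => simp
  | cons r t ih =>
    rw [List.foldl_cons, List.filterMap_cons]
    by_cases h : pvOverlap target r
    · have h' := h
      unfold pvOverlap at h'
      rw [if_pos h', if_pos h, ih]
      rfl
    · have h' := h
      unfold pvOverlap at h'
      rw [if_neg h', if_neg h, ih]

lemma merge_some (x : Int) (t : List Int) :
    t.foldl pvMerge (some x) = some (t.foldl min x) := by
  induction t generalizing x with
  | nil => simp
  | cons v s ih =>
    simp only [List.foldl_cons]
    have hm : pvMerge (some x) v = some (min x v) := by
      simp only [pvMerge]
      split_ifs with h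
      · congr 1; omega
      · congr 1; omega
    rw [hm, ih]

theorem botside_core (target : List Int) (list1 : List (List Int)) (height width : Int) :
    botside_expand target list1 height width = botside_expand_alt target list1 height width := by
  simp only [botside_expand, botside_expand_alt]
  rw [side_bool_eq, best_eq]
  simp only [List.nil_append]
  simp only [or_fold_eq]
  simp only [Bool.false_or, List.any_map]
  rcases hds : list1.filterMap (fun row => if pvOverlap target row then some (pvDist target row) else none) with _ | ⟨x, t⟩
  · have hany : list1.any (id ∘ fun row => decide (pvOverlap target row)) = false := by
      rw [List.filterMap_eq_nil_iff] at hds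
      simp only [List.any_eq_false, Function.comp, id_eq, decide_eq_true_eq]
      intro r hr hov
      have h2 := hds r hr
      rw [if_pos hov] at h2
      simp at h2
    rw [hany]
    simp
  · have hany : list1.any (id ∘ fun row => decide (pvOverlap target row)) = true := by
      have hx : x ∈ list1.filterMap (fun row => if pvOverlap target row then some (pvDist target row) else none) := by
        rw [hds]; exact List.mem_cons_self
      rw [List.mem_filterMap] at hx
      obtain ⟨r, hr, hfr⟩ := hx
      simp only [List.any_eq_true, Function.comp, id_eq, decide_eq_true_eq]
      refine ⟨r, hr, ?_⟩
      by_contra hov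
      rw [if_neg hov] at hfr
      simp at hfr
    rw [hany, diffs_eq]
    simp only [List.nil_append, hds, List.foldl_cons]
    show (PySem.List.min? (x :: t) (fun x => x)).getD 0 = _
    rw [PySem.List.min?_id_cons]
    have hm : pvMerge none x = some x := rfl
    rw [hm, merge_some]
    rfl

-- ===== VERDICT (by name: the statement is the Claim_ definition above) =====
theorem botside_expand_spec : Claim_equal_botside_expand := by
  intro target list1 height width _ _
  unfold Spec_botside_expand
  exact botside_core target list1 height width
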